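-- pv_equiv track=rewrite | github.com/psw204/harmful-detect-muhayu | 박상원/모델_발전_과정/final_model10/final_model_release/final_model_release.py | infer_behavior_from_objects
-- ===== SOURCE A (Python) =====
-- def infer_behavior_from_objects(object_counts):
--     """
--     객체 기반 행동 추론 (휴리스틱 규칙)
--
--     YOLO로 탐지된 객체를 바탕으로 특정 행동을 추론합니다.
--     CLIP의 Zero-shot 감지를 보완하는 역할.
--
--     규칙 예시:
--     - cigarette 감지 → smoking 추론
--     - bottle + person ≥ 2 → drinking 추론
--     - knife + person → threatening 추론
--
--     Args:
--         object_counts: 객체별 감지 개수 딕셔너리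
--                       예: {'cigarette': 2, 'person': 1, ...}
--
--     Returns:
--         inferred_behaviors: 추론된 행동 리스트
--                            예: ['smoking', 'drinking']
--     """
--     inferred_behaviors = []
--
--     # 규칙 1: 담배 감지 → 흡연
--     if object_counts.get('cigarette', 0) > 0:
--         inferred_behaviors.append('smoking')
--
--     # 규칙 2: 음주 관련 객체 1개 이상 → 음주 (wine glass, beer만 사용 - bottle, cup 제거)
--     drinking_objects = ['wine glass', 'beer']
--     if sum(object_counts.get(obj, 0) for obj in drinking_objects) >= 1:
--         inferred_behaviors.append('drinking')
--
--     # 규칙 3: 주사기 감지 → 약물 사용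
--     drug_objects = ['syringe']
--     if sum(object_counts.get(obj, 0) for obj in drug_objects) > 0:
--         inferred_behaviors.append('drug_use')
--
--     # 규칙 4: 무기 + 사람 → 위협
--     weapon_objects = ['knife', 'gun', 'pistol', 'rifle', 'sword', 'axe']
--     if sum(object_counts.get(obj, 0) for obj in weapon_objects) > 0:
--         if object_counts.get('person', 0) > 0:
--             inferred_behaviors.append('threatening')
--
--     return inferred_behaviors
-- ===== SOURCE B (Python) =====
-- _CATEGORY = {
--     'cigarette': 'cig',
--     'wine glass': 'drink', 'beer': 'drink',
--     'syringe': 'drug',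
--     'knife': 'weapon', 'gun': 'weapon', 'pistol': 'weapon',
--     'rifle': 'weapon', 'sword': 'weapon', 'axe': 'weapon',
--     'person': 'person',
-- }
--
--
-- def infer_behavior_from_objects(object_counts):
--     # One pass over the detections: bucket every count into its category,
--     # then read the four rules off the bucket totals.
--     cig = drink = drug = weapon = person = 0
--     for key, cnt in object_counts.items():
--         cat = _CATEGORY.get(key)
--         if cat == 'cig':
--             cig += cnt
--         elif cat == 'drink':
--             drink += cnt
--         elif cat == 'drug':
--             drug += cnt
--         elif cat == 'weapon':
--             weapon += cnt
--         elif cat == 'person':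
--             person += cnt
--     behaviors = []
--     if cig > 0:
--         behaviors.append('smoking')
--     if drink >= 1:
--         behaviors.append('drinking')
--     if drug > 0:
--         behaviors.append('drug_use')
--     if weapon > 0 and person > 0:
--         behaviors.append('threatening')
--     return behaviors
-- ===== Notes on version B (the rewrite author's own statement) =====
-- stated objective: alternative
-- what changed: Instead of A's per-rule dict.get lookups of hard-coded key lists, B makes one pass over the detections, bucketing every count into its category via a key-to-category table, and then reads the four rules off the five bucket totals.
import Mathlib
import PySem

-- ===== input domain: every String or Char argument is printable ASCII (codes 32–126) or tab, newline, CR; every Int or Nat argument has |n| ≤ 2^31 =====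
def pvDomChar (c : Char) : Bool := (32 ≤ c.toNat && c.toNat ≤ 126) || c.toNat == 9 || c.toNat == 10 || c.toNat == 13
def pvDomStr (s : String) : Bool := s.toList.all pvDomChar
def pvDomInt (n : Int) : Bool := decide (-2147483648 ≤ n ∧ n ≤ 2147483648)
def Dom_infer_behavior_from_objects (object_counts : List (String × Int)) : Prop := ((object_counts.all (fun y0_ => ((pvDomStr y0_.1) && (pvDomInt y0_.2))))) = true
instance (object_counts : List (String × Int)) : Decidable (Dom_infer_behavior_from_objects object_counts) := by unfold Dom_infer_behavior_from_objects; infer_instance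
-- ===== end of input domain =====

-- B replaces A's per-rule dict lookups by ONE pass over the detections that buckets every count
-- into its category (key→category table), then reads the rules off the bucket totals; objective: alternative.


-- ===== PORT A =====
-- object_counts.get(k, 0): first-match lookup in the association list, default 0
def infer_behavior_from_objects (object_counts : List (String × Int)) : List String :=
  let d := PySem.Dict.mk object_counts
  let inferred_behaviors : List String := []
  -- rule 1: cigarette → smoking
  let inferred_behaviors :=
    if d.getD "cigarette" 0 > 0 then inferred_behaviors ++ ["smoking"] else inferred_behaviors
  -- rule 2: drinking objects ≥ 1 → drinking
  let drinking_objects : List String := ["wine glass", "beer"]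
  let inferred_behaviors :=
    if (drinking_objects.foldl (fun s obj => s + d.getD obj 0) 0) ≥ 1
    then inferred_behaviors ++ ["drinking"] else inferred_behaviors
  -- rule 3: drug objects > 0 → drug_use
  let drug_objects : List String := ["syringe"]
  let inferred_behaviors :=
    if (drug_objects.foldl (fun s obj => s + d.getD obj 0) 0) > 0
    then inferred_behaviors ++ ["drug_use"] else inferred_behaviors
  -- rule 4: weapon > 0 and person > 0 → threatening
  let weapon_objects : List String := ["knife", "gun", "pistol", "rifle", "sword", "axe"]
  let inferred_behaviors :=
    if (weapon_objects.foldl (fun s obj => s + d.getD obj 0) 0) > 0 then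
      if d.getD "person" 0 > 0 then inferred_behaviors ++ ["threatening"] else inferred_behaviors
    else inferred_behaviors
  inferred_behaviors

-- ===== PORT B =====
-- the module-level key → category table _CATEGORY
def pvCategory : PySem.Dict String String :=
  PySem.Dict.mk
    [("cigarette", "cig"),
     ("wine glass", "drink"), ("beer", "drink"),
     ("syringe", "drug"),
     ("knife", "weapon"), ("gun", "weapon"), ("pistol", "weapon"),
     ("rifle", "weapon"), ("sword", "weapon"), ("axe", "weapon"),
     ("person", "person")]

-- one pass over object_counts.items(); cat = _CATEGORY.get(key) is Option String (None → no bucket)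
def infer_behavior_from_objects_alt (object_counts : List (String × Int)) : List String :=
  let totals :=
    object_counts.foldl
      (fun (t : Int × Int × Int × Int × Int) kv =>
        let cat := pvCategory.get? kv.1
        if cat == some "cig" then (t.1 + kv.2, t.2.1, t.2.2.1, t.2.2.2.1, t.2.2.2.2)
        else if cat == some "drink" then (t.1, t.2.1 + kv.2, t.2.2.1, t.2.2.2.1, t.2.2.2.2)
        else if cat == some "drug" then (t.1, t.2.1, t.2.2.1 + kv.2, t.2.2.2.1, t.2.2.2.2)
        else if cat == some "weapon" then (t.1, t.2.1, t.2.2.1, t.2.2.2.1 + kv.2, t.2.2.2.2)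
        else if cat == some "person" then (t.1, t.2.1, t.2.2.1, t.2.2.2.1, t.2.2.2.2 + kv.2)
        else t)
      (0, 0, 0, 0, 0)
  let behaviors : List String := []
  let behaviors := if totals.1 > 0 then behaviors ++ ["smoking"] else behaviors
  let behaviors := if totals.2.1 ≥ 1 then behaviors ++ ["drinking"] else behaviors
  let behaviors := if totals.2.2.1 > 0 then behaviors ++ ["drug_use"] else behaviors
  let behaviors :=
    if totals.2.2.2.1 > 0 && totals.2.2.2.2 > 0 then behaviors ++ ["threatening"] else behaviors
  behaviors

-- ===== PRECONDITION & SPEC =====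
-- Pre_ excludes association lists with a duplicated key: they encode no Python dict (A's parameter
-- is a dict, whose keys are unique), and which of the duplicate values counts is anybody's choice.
def Pre_infer_behavior_from_objects (object_counts : List (String × Int)) : Prop :=
  (object_counts.map Prod.fst).Nodup
instance (object_counts : List (String × Int)) : Decidable (Pre_infer_behavior_from_objects object_counts) := by unfold Pre_infer_behavior_from_objects; infer_instance

def pvWitness_infer_behavior_from_objects : (List (String × Int)) :=
  [("cigarette", 2), ("person", 1)]

def Spec_infer_behavior_from_objects (object_counts : List (String × Int)) (out : List String) : Prop := out = infer_behavior_from_objects_alt object_counts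
instance (object_counts : List (String × Int)) (out : List String) : Decidable (Spec_infer_behavior_from_objects object_counts out) := by unfold Spec_infer_behavior_from_objects; infer_instance

-- ===== CLAIM (what is proved, stated in full; the proofs are below) =====
def Claim_equal_infer_behavior_from_objects : Prop := ∀ (object_counts : List (String × Int)), Dom_infer_behavior_from_objects object_counts → Pre_infer_behavior_from_objects object_counts → Spec_infer_behavior_from_objects object_counts (infer_behavior_from_objects object_counts)

-- ===== LEMMAS AND PROOFS =====

-- lookup with default 0, as both ports use it
def pvG (l : List (String × Int)) (k : String) : Int := (PySem.Dict.mk l).getD k 0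

theorem pvG_cons (p : String × Int) (rest : List (String × Int)) (k : String) :
    pvG (p :: rest) k = if p.1 == k then p.2 else pvG rest k := by
  obtain ⟨k0, v0⟩ := p
  simp only [pvG, PySem.Dict.getD_eq_get?_getD, PySem.Dict.get?_mk_cons]
  by_cases h : k0 == k <;> simp [h]

theorem pvG_not_mem (l : List (String × Int)) (k : String) (h : k ∉ l.map Prod.fst) :
    pvG l k = 0 := by
  induction l with
  | nil => rfl
  | cons p rest ih =>
    simp only [List.map_cons, List.mem_cons, not_or] at h
    rw [pvG_cons]
    have : (p.1 == k) = false := by simp [Ne.symm h.1]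
    simp [this, ih h.2]

-- the single pass computes, for an association list with distinct keys, exactly
-- A's per-category lookup sums (offset by the accumulator it starts from)
theorem pvMaster (l : List (String × Int)) (h : (l.map Prod.fst).Nodup)
    (a b c d e : Int) :
    l.foldl
      (fun (t : Int × Int × Int × Int × Int) kv =>
        let cat := pvCategory.get? kv.1
        if cat == some "cig" then (t.1 + kv.2, t.2.1, t.2.2.1, t.2.2.2.1, t.2.2.2.2)
        else if cat == some "drink" then (t.1, t.2.1 + kv.2, t.2.2.1, t.2.2.2.1, t.2.2.2.2)
        else if cat == some "drug" then (t.1, t.2.1, t.2.2.1 + kv.2, t.2.2.2.1, t.2.2.2.2)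
        else if cat == some "weapon" then (t.1, t.2.1, t.2.2.1, t.2.2.2.1 + kv.2, t.2.2.2.2)
        else if cat == some "person" then (t.1, t.2.1, t.2.2.1, t.2.2.2.1, t.2.2.2.2 + kv.2)
        else t)
      (a, b, c, d, e)
    = (a + pvG l "cigarette",
       b + pvG l "wine glass" + pvG l "beer",
       c + pvG l "syringe",
       d + pvG l "knife" + pvG l "gun" + pvG l "pistol" + pvG l "rifle" + pvG l "sword" + pvG l "axe",
       e + pvG l "person") := by
  induction l generalizing a b c d e with
  | nil => simp [show ∀ k, pvG [] k = 0 from fun k => rfl]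
  | cons p rest ih =>
    obtain ⟨k0, v0⟩ := p
    simp only [List.map_cons, List.nodup_cons] at h
    have hz : k0 ∉ rest.map Prod.fst := h.1
    simp only [List.foldl_cons]
    by_cases e1 : k0 = "cigarette"
    · subst e1; rw [ih h.2]
      simp [pvCategory, PySem.Dict.get?_mk_cons, pvG_cons,
        pvG_not_mem rest _ hz]
    by_cases e2 : k0 = "wine glass"
    · subst e2; rw [ih h.2]
      simp [pvCategory, PySem.Dict.get?_mk_cons, pvG_cons,
        pvG_not_mem rest _ hz]
    by_cases e3 : k0 = "beer"
    · subst e3; rw [ih h.2]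
      simp [pvCategory, PySem.Dict.get?_mk_cons, pvG_cons, Prod.ext_iff,
        pvG_not_mem rest _ hz]
      omega
    by_cases e4 : k0 = "syringe"
    · subst e4; rw [ih h.2]
      simp [pvCategory, PySem.Dict.get?_mk_cons, pvG_cons,
        pvG_not_mem rest _ hz]
    by_cases e5 : k0 = "knife"
    · subst e5; rw [ih h.2]
      simp [pvCategory, PySem.Dict.get?_mk_cons, pvG_cons,
        pvG_not_mem rest _ hz]
    by_cases e6 : k0 = "gun"
    · subst e6; rw [ih h.2]
      simp [pvCategory, PySem.Dict.get?_mk_cons, pvG_cons, Prod.ext_iff,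
        pvG_not_mem rest _ hz]
      omega
    by_cases e7 : k0 = "pistol"
    · subst e7; rw [ih h.2]
      simp [pvCategory, PySem.Dict.get?_mk_cons, pvG_cons, Prod.ext_iff,
        pvG_not_mem rest _ hz]
      omega
    by_cases e8 : k0 = "rifle"
    · subst e8; rw [ih h.2]
      simp [pvCategory, PySem.Dict.get?_mk_cons, pvG_cons, Prod.ext_iff,
        pvG_not_mem rest _ hz]
      omega
    by_cases e9 : k0 = "sword"
    · subst e9; rw [ih h.2]
      simp [pvCategory, PySem.Dict.get?_mk_cons, pvG_cons, Prod.ext_iff,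
        pvG_not_mem rest _ hz]
      omega
    by_cases e10 : k0 = "axe"
    · subst e10; rw [ih h.2]
      simp [pvCategory, PySem.Dict.get?_mk_cons, pvG_cons, Prod.ext_iff,
        pvG_not_mem rest _ hz]
      omega
    by_cases e11 : k0 = "person"
    · subst e11; rw [ih h.2]
      simp [pvCategory, PySem.Dict.get?_mk_cons, pvG_cons,
        pvG_not_mem rest _ hz]
    rw [ih h.2]
    simp [pvCategory, PySem.Dict.get?_mk_cons, pvG_cons, beq_iff_eq,
      show ∀ k : String, PySem.Dict.get? (PySem.Dict.mk ([] : List (String × String))) k = none from fun _ => rfl,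
      e1, Ne.symm e1, e2, Ne.symm e2, e3, Ne.symm e3, e4, Ne.symm e4, e5, Ne.symm e5, e6, Ne.symm e6, e7, Ne.symm e7, e8, Ne.symm e8, e9, Ne.symm e9, e10, Ne.symm e10, e11, Ne.symm e11]

-- the two final assemblies of the behavior list agree, given equal totals
theorem pvAssemble (c g1 g2 s k1 k2 k3 k4 k5 k6 p : Int) :
    (let i0 : List String := []
     let i1 := if c > 0 then i0 ++ ["smoking"] else i0
     let i2 := if 0 + g1 + g2 ≥ 1 then i1 ++ ["drinking"] else i1
     let i3 := if 0 + s > 0 then i2 ++ ["drug_use"] else i2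
     if 0 + k1 + k2 + k3 + k4 + k5 + k6 > 0 then
       (if p > 0 then i3 ++ ["threatening"] else i3) else i3)
    = (let j0 : List String := []
       let j1 := if 0 + c > 0 then j0 ++ ["smoking"] else j0
       let j2 := if 0 + g1 + g2 ≥ 1 then j1 ++ ["drinking"] else j1
       let j3 := if 0 + s > 0 then j2 ++ ["drug_use"] else j2
       if (0 + k1 + k2 + k3 + k4 + k5 + k6 > 0 : Bool) && (0 + p > 0 : Bool)
       then j3 ++ ["threatening"] else j3) := by
  have hp : ((0 : Int) + p > 0) ↔ p > 0 := by omega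
  have hc : ((0 : Int) + c > 0) ↔ c > 0 := by omega
  by_cases h1 : c > 0 <;>
  by_cases h2 : 0 + g1 + g2 ≥ 1 <;>
  by_cases h3 : 0 + s > 0 <;>
  by_cases h4 : 0 + k1 + k2 + k3 + k4 + k5 + k6 > 0 <;>
  by_cases h5 : p > 0 <;>
  simp only [h1, h2, h3, h4, h5, hp, hc] <;>
  simp

-- ===== VERDICT (by name: the statement is the Claim_ definition above) =====
theorem infer_behavior_from_objects_spec : Claim_equal_infer_behavior_from_objects := by
  intro oc _ hpre
  show infer_behavior_from_objects oc = infer_behavior_from_objects_alt oc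
  simp only [infer_behavior_from_objects, infer_behavior_from_objects_alt, List.foldl,
    pvMaster oc hpre 0 0 0 0 0]
  have h0 : ∀ k, pvG oc k = (PySem.Dict.mk oc).getD k 0 := fun _ => rfl
  simp only [← h0]
  exact pvAssemble (pvG oc "cigarette") (pvG oc "wine glass") (pvG oc "beer")
    (pvG oc "syringe") (pvG oc "knife") (pvG oc "gun") (pvG oc "pistol")
    (pvG oc "rifle") (pvG oc "sword") (pvG oc "axe") (pvG oc "person")
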